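-- pv_equiv track=rewrite | github.com/Wangsherpa/data-structures---algorithms | 0-Unscramble Computer Science Problems/Task4.py | possible_telemarketers
-- ===== SOURCE A (Python) =====
-- def possible_telemarketers(calls, texts):
-- 	possible_teles = set()
--
-- 	for row in calls:
-- 		possible_teles.add(row[0])
-- 	for row in calls:
-- 		if row[1] in possible_teles:
-- 			possible_teles.remove(row[1])
-- 	for row in texts:
-- 		if row[0] in possible_teles:
-- 			possible_teles.remove(row[0])
-- 		if row[1] in possible_teles:
-- 			possible_teles.remove(row[1])
-- 	return possible_teles
-- ===== SOURCE B (Python) =====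
-- def possible_telemarketers(calls, texts):
--     # Build one exclusion set (all call receivers and all text participants),
--     # then filter the callers against it in a single pass.
--     not_tele = {row[1] for row in calls}
--     for row in texts:
--         not_tele.add(row[0])
--         not_tele.add(row[1])
--     return {row[0] for row in calls if row[0] not in not_tele}
-- ===== Notes on version B (the rewrite author's own statement) =====
-- stated objective: simpler
-- what changed: Instead of building the caller set and whittling it down with three mutate-and-remove loops, B builds a single exclusion set (receivers plus text participants) in one indexing pass and then returns the callers filtered against it, with no removals.
import Mathlib
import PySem

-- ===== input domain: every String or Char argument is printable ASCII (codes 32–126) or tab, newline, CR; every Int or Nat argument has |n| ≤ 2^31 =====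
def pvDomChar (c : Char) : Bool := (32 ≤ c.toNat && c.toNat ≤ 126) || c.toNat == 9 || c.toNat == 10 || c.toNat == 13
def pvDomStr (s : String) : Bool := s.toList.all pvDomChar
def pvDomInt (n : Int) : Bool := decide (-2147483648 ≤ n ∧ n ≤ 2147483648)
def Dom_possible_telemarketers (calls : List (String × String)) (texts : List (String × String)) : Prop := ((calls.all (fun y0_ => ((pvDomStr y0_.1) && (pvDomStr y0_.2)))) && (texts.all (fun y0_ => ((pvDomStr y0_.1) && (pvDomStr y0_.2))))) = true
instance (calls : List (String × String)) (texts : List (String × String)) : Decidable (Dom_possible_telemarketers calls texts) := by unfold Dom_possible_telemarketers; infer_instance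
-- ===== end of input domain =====

-- B replaces A's three mutate-and-remove passes by one exclusion index plus one filtering pass (objective: simpler).

-- ===== PORT A =====
def possible_telemarketers (calls : List (String × String)) (texts : List (String × String)) : List String :=
  let possible_teles : PySem.Set String := PySem.Set.empty
  let possible_teles := calls.foldl (fun s row => PySem.Set.add s row.1) possible_teles
  let possible_teles := calls.foldl (fun s row =>
      if PySem.Set.contains s row.2 then PySem.Set.discard s row.2 else s) possible_teles
  let possible_teles := texts.foldl (fun s row =>
      let s := if PySem.Set.contains s row.1 then PySem.Set.discard s row.1 else s
      if PySem.Set.contains s row.2 then PySem.Set.discard s row.2 else s) possible_teles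
  possible_teles

-- ===== PORT B =====
def possible_telemarketers_alt (calls : List (String × String)) (texts : List (String × String)) : List String :=
  let not_tele : PySem.Set String := PySem.Set.ofList (calls.map Prod.snd)
  let not_tele := texts.foldl (fun s row => PySem.Set.add (PySem.Set.add s row.1) row.2) not_tele
  PySem.Set.ofList ((calls.map Prod.fst).filter (fun c => !(PySem.Set.contains not_tele c)))

-- ===== PRECONDITION & SPEC =====
def Spec_possible_telemarketers (calls : List (String × String)) (texts : List (String × String)) (out : List String) : Prop := out = possible_telemarketers_alt calls texts
instance (calls : List (String × String)) (texts : List (String × String)) (out : List String) : Decidable (Spec_possible_telemarketers calls texts out) := by unfold Spec_possible_telemarketers; infer_instance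

-- ===== CLAIM (what is proved, stated in full; the proofs are below) =====
def Claim_equal_possible_telemarketers : Prop := ∀ (calls : List (String × String)) (texts : List (String × String)), Dom_possible_telemarketers calls texts → Spec_possible_telemarketers calls texts (possible_telemarketers calls texts)

-- ===== LEMMAS AND PROOFS =====

-- "if x in s: s.remove(x)" is an unconditional filter.
theorem step_eq_filter (s : List String) (x : String) :
    (if PySem.Set.contains s x then PySem.Set.discard s x else s)
      = s.filter (fun y => !(y == x)) := by
  by_cases h : PySem.Set.contains s x = true
  · rw [if_pos h]; rfl
  · simp only [h, if_neg, Bool.false_eq_true, not_false_eq_true]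
    refine (List.filter_eq_self.mpr ?_).symm
    intro a ha
    simp only [PySem.Set.contains_eq_listContains] at h
    simp only [Bool.not_eq_eq_eq_not, Bool.not_true, beq_eq_false_iff_ne]
    rintro rfl
    exact h (List.elem_iff.mpr ha)

-- Folding A's second loop over the receivers filters them all out at once.
theorem foldl_remove_eq_filter (rs : List String) (s : List String) :
    rs.foldl (fun s x => if PySem.Set.contains s x then PySem.Set.discard s x else s) s
      = s.filter (fun y => !(rs.contains y)) := by
  induction rs generalizing s with
  | nil => simp
  | cons x rs ih =>
    rw [List.foldl_cons, ih, step_eq_filter, List.filter_filter]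
    apply List.filter_congr
    intro y _
    by_cases hy : y = x <;> simp [hy, Bool.and_comm]

-- Folding A's third loop over the texts filters out both participants of every text.
theorem foldl_remove2_eq_filter (ts : List (String × String)) (s : List String) :
    ts.foldl (fun s row =>
        let s := if PySem.Set.contains s row.1 then PySem.Set.discard s row.1 else s
        if PySem.Set.contains s row.2 then PySem.Set.discard s row.2 else s) s
      = s.filter (fun y => !(ts.any (fun row => y == row.1 || y == row.2))) := by
  induction ts generalizing s with
  | nil => simp
  | cons t ts ih =>
    rw [List.foldl_cons, ih]
    simp only [step_eq_filter, List.filter_filter]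
    apply List.filter_congr
    intro y _
    simp only [List.any_cons]
    cases h1 : (y == t.1) <;> cases h2 : (y == t.2) <;> simp_all

-- Membership in B's exclusion index.
theorem mem_fold_add2 (ts : List (String × String)) (s : List String) (y : String) :
    y ∈ ts.foldl (fun s row => PySem.Set.add (PySem.Set.add s row.1) row.2) s
      ↔ y ∈ s ∨ ∃ row ∈ ts, y = row.1 ∨ y = row.2 := by
  induction ts generalizing s with
  | nil => simp
  | cons t ts ih =>
    simp only [List.foldl_cons, ih, PySem.Set.mem_add, List.mem_cons]
    constructor
    · rintro (((h | h) | h) | ⟨r, hr, h⟩)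
      · exact Or.inl h
      · exact Or.inr ⟨t, Or.inl rfl, Or.inl h⟩
      · exact Or.inr ⟨t, Or.inl rfl, Or.inr h⟩
      · exact Or.inr ⟨r, Or.inr hr, h⟩
    · rintro (h | ⟨r, (rfl | hr), h⟩)
      · exact Or.inl (Or.inl (Or.inl h))
      · rcases h with h | h
        · exact Or.inl (Or.inl (Or.inr h))
        · exact Or.inl (Or.inr h)
      · exact Or.inr ⟨r, hr, h⟩

-- set(filter) = filter(set): deduplication commutes with filtering.
theorem ofList_filter (q : String → Bool) (xs : List String) :
    PySem.Set.ofList (xs.filter q) = (PySem.Set.ofList xs).filter q := by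
  induction xs with
  | nil => simp [PySem.Set.ofList]
  | cons x xs ih =>
    by_cases hq : q x = true
    · rw [List.filter_cons_of_pos hq, PySem.Set.ofList_cons, PySem.Set.ofList_cons,
        List.filter_cons_of_pos hq, ih]
      simp only [PySem.Set.discard, List.filter_filter]
      refine congrArg (x :: ·) ?_
      apply List.filter_congr
      intro y _
      exact Bool.and_comm _ _
    · rw [List.filter_cons_of_neg hq, PySem.Set.ofList_cons,
        List.filter_cons_of_neg hq, ih, PySem.Set.discard]
      rw [List.filter_filter]
      apply List.filter_congr
      intro y _
      cases h : q y
      · simp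
      · simp only [Bool.true_and]
        cases hb : (y == x)
        · rfl
        · exact absurd (eq_of_beq hb ▸ h) (by simpa using hq)

theorem possible_telemarketers_eq (calls texts : List (String × String)) :
    possible_telemarketers calls texts = possible_telemarketers_alt calls texts := by
  unfold possible_telemarketers possible_telemarketers_alt
  simp only []
  rw [show (calls.foldl (fun s row => PySem.Set.add s row.1) PySem.Set.empty)
        = PySem.Set.ofList (calls.map Prod.fst) by
      rw [PySem.Set.ofList_eq_foldl, List.foldl_map]; rfl]
  rw [show (calls.foldl (fun s row =>
        if PySem.Set.contains s row.2 then PySem.Set.discard s row.2 else s)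
        (PySem.Set.ofList (calls.map Prod.fst)))
      = (calls.map Prod.snd).foldl (fun s x =>
          if PySem.Set.contains s x then PySem.Set.discard s x else s)
          (PySem.Set.ofList (calls.map Prod.fst)) by rw [List.foldl_map]]
  rw [foldl_remove_eq_filter, foldl_remove2_eq_filter, ofList_filter,
    List.filter_filter]
  apply List.filter_congr
  intro y _
  rw [Bool.eq_iff_iff]
  simp only [PySem.Set.contains_eq_listContains, Bool.and_eq_true, Bool.not_eq_true',
    List.any_eq_false]
  simp [mem_fold_add2, PySem.Set.mem_ofList, List.mem_map, not_or, beq_iff_eq]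
  tauto

-- ===== VERDICT (by name: the statement is the Claim_ definition above) =====
theorem possible_telemarketers_spec : Claim_equal_possible_telemarketers := by
  intro calls texts _
  exact possible_telemarketers_eq calls texts
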